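-- pv_equiv track=rewrite | github.com/Holdi601/StarCitizenGAnalyzer | analyzeVideo.py | cleanArray
-- ===== SOURCE A (Python) =====
-- def cleanArray(arr):
-- 	result=[]
-- 	lastValue = arr[0]
-- 	result.append(lastValue)
-- 	for i in range(1, len(arr)):
-- 		if arr[i]<0:
-- 			result.append(lastValue)
-- 		else:
-- 			result.append(arr[i])
-- 		lastValue=arr[i]
-- 	return result
-- ===== SOURCE B (Python) =====
-- def cleanArray(arr):
-- 	negatives = [i for i in range(1, len(arr)) if arr[i] < 0]
-- 	result = list(arr)
-- 	for i in negatives: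
-- 		result[i] = arr[i - 1]
-- 	return result
-- ===== Notes on version B (the rewrite author's own statement) =====
-- stated objective: alternative
-- what changed: B is a staged copy-then-patch: it first collects the indices of the negative entries after the first element, copies the input, and then overwrites only those slots with the original previous element, instead of A's single accumulator loop that appends every element while threading lastValue.
-- outside the precondition, e.g. on cleanArray([]): A raises IndexError, B returns []
import Mathlib
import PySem

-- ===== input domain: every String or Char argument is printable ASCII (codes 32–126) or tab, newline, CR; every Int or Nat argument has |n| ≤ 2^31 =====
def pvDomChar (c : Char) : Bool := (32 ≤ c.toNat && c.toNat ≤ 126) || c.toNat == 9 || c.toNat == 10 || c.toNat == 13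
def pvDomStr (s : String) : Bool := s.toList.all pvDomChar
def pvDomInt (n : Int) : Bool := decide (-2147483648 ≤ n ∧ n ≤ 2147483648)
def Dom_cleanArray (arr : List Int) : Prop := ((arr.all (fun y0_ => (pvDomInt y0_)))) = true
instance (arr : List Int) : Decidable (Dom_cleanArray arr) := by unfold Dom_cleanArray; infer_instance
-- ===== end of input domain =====

-- B replaces A's accumulator loop by a staged copy-then-patch pass (collect negative indices, copy, overwrite from the original); same O(n) cost, a different decomposition.


-- ===== PORT A =====
-- A: lastValue := arr[0]; result := [lastValue]; loop over the remaining elements,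
-- appending lastValue for a negative element, the element itself otherwise, then
-- updating lastValue. The for over range(1, len(arr)) reading arr[i] is ported as a
-- foldl over arr.tail with the same (result, lastValue) state.
def cleanArray (arr : List Int) : List Int :=
  match arr with
  | [] => []      -- Python raises IndexError at the first-element access; excluded by Pre_
  | a0 :: rest =>
    (rest.foldl
      (fun (st : List Int × Int) ai =>
        (st.1 ++ [if ai < 0 then st.2 else ai], ai))
      ([a0], a0)).1

-- ===== PORT B =====
-- B: negatives = [i for i in range(1, len(arr)) if arr[i] < 0];
--    result = list(arr); for i in negatives: result[i] = arr[i-1]; return result.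
-- range(1, len(arr)) over Nat indices is List.range' 1 (arr.length - 1); arr[i] and
-- arr[i-1] are in range for every i produced, so getD is exact; result[i] = … is List.set.
def cleanArray_alt (arr : List Int) : List Int :=
  let negatives := (List.range' 1 (arr.length - 1)).filter (fun i => decide (arr.getD i 0 < 0))
  let result := arr
  negatives.foldl (fun res i => res.set i (arr.getD (i - 1) 0)) result

-- ===== PRECONDITION & SPEC =====
-- A raises IndexError on the empty list when reading the first element; Pre_ excludes exactly that input.
def Pre_cleanArray (arr : List Int) : Prop := arr ≠ []
instance (arr : List Int) : Decidable (Pre_cleanArray arr) := by unfold Pre_cleanArray; infer_instance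
def pvWitness_cleanArray : List Int := [1, -2, 3]

def Spec_cleanArray (arr : List Int) (out : List Int) : Prop := out = cleanArray_alt arr
instance (arr : List Int) (out : List Int) : Decidable (Spec_cleanArray arr out) := by unfold Spec_cleanArray; infer_instance

-- ===== CLAIM (what is proved, stated in full; the proofs are below) =====
def Claim_equal_cleanArray : Prop := ∀ (arr : List Int), Dom_cleanArray arr → Pre_cleanArray arr → Spec_cleanArray arr (cleanArray arr)

-- ===== LEMMAS AND PROOFS =====

-- A's loop, closed form: the tail is a map over adjacent pairs zip arr arr.tail.
theorem cleanArray_foldl_zip (xs : List Int) : ∀ (acc : List Int) (prev : Int),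
    (xs.foldl (fun (st : List Int × Int) ai => (st.1 ++ [if ai < 0 then st.2 else ai], ai)) (acc, prev)).1
      = acc ++ ((prev :: xs).zip xs).map (fun pc => if pc.2 < 0 then pc.1 else pc.2) := by
  induction xs with
  | nil => intro acc prev; simp
  | cons c rest ih =>
    intro acc prev
    simp [List.foldl_cons, ih]

-- B's patch loop, elementwise: slot j holds f j if j was patched, the original else.
theorem foldl_set_getElem? (f : Nat → Int) : ∀ (L : List Nat) (res : List Int) (j : Nat),
    (∀ i ∈ L, i < res.length) →
    (L.foldl (fun res i => res.set i (f i)) res)[j]?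
      = if j ∈ L then (if j < res.length then some (f j) else none) else res[j]? := by
  intro L
  induction L with
  | nil => intro res j _; simp
  | cons hd tl ih =>
    intro res j hlt
    have hhd : hd < res.length := hlt hd (by simp)
    rw [List.foldl_cons, ih (res.set hd (f hd)) j
      (by intro i hi; simpa using hlt i (List.mem_cons_of_mem _ hi))]
    simp only [List.length_set, List.getElem?_set]
    by_cases hjt : j ∈ tl <;> by_cases hjh : hd = j <;>
      simp [hjt, hjh, List.mem_cons] <;> omega

-- ===== VERDICT (by name: the statement is the Claim_ definition above) =====
theorem cleanArray_spec : Claim_equal_cleanArray := by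
  intro arr _ hpre
  unfold Spec_cleanArray
  match arr with
  | [] => exact absurd rfl hpre
  | a0 :: rest =>
    apply List.ext_getElem?
    intro j
    set arr := a0 :: rest with harr
    have hlenA : (cleanArray arr).length = arr.length := by
      rw [harr]; simp [cleanArray, cleanArray_foldl_zip]
    have hmem : ∀ i ∈ (List.range' 1 (arr.length - 1)).filter
        (fun i => decide (arr.getD i 0 < 0)), i < arr.length := by
      intro i hi
      have := (List.mem_filter.mp hi).1
      have := List.mem_range'_1.mp this
      omega
    rw [show cleanArray_alt arr =
        ((List.range' 1 (arr.length - 1)).filter (fun i => decide (arr.getD i 0 < 0))).foldl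
          (fun res i => res.set i (arr.getD (i - 1) 0)) arr from rfl,
      foldl_set_getElem? _ _ _ _ hmem]
    by_cases hj : j < arr.length
    · -- both sides: the value at slot j
      have hmemiff : (j ∈ (List.range' 1 (arr.length - 1)).filter
            (fun i => decide (arr.getD i 0 < 0))) ↔ (1 ≤ j ∧ arr.getD j 0 < 0) := by
        constructor
        · intro h
          have h1 := List.mem_range'_1.mp (List.mem_filter.mp h).1
          have h2 := of_decide_eq_true (List.mem_filter.mp h).2
          exact ⟨h1.1, h2⟩
        · intro ⟨h1, h2⟩
          refine List.mem_filter.mpr ⟨List.mem_range'_1.mpr ⟨h1, ?_⟩, by simpa using h2⟩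
          have : arr.length = rest.length + 1 := by simp [harr]
          omega
      -- A's slot j
      have hA : (cleanArray arr)[j]? =
          some (if 1 ≤ j ∧ arr.getD j 0 < 0 then arr.getD (j - 1) 0 else arr.getD j 0) := by
        rw [show cleanArray arr =
            [a0] ++ ((a0 :: rest).zip rest).map (fun pc => if pc.2 < 0 then pc.1 else pc.2) by
          simp [harr, cleanArray, cleanArray_foldl_zip]]
        match j with
        | 0 => simp [harr]
        | Nat.succ k =>
          have hk : k < rest.length := by
            have : arr.length = rest.length + 1 := by simp [harr]
            omega
          have hk' : k < arr.length := by simp [harr]; omega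
          have hzip : ((a0 :: rest).zip rest)[k]? = some ((a0 :: rest)[k], rest[k]) := by
            exact List.getElem?_zip_eq_some.mpr
              ⟨List.getElem?_eq_getElem (by simp; omega), List.getElem?_eq_getElem hk⟩
          have hgk : arr.getD (k + 1) 0 = rest[k] := by
            simp [harr, List.getD, List.getElem?_eq_getElem hk]
          have hgp : arr.getD (k + 1 - 1) 0 = (a0 :: rest)[k] := by
            simp [harr, List.getD, List.getElem?_eq_getElem (l := a0 :: rest)
              (by simpa [harr] using hk')]
          simp only [List.singleton_append, List.getElem?_cons_succ, List.getElem?_map, hzip,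
            Option.map_some]
          rw [hgk, hgp]
          by_cases hneg : rest[k] < 0 <;> simp [hneg]
      rw [hA]
      by_cases hmemj : 1 ≤ j ∧ arr.getD j 0 < 0
      · rw [if_pos hmemj, if_pos (hmemiff.mpr hmemj), if_pos hj]
      · rw [if_neg (fun h => hmemj (hmemiff.mp h)), if_neg hmemj,
          List.getD, List.getElem?_eq_getElem hj]
        simp
    · -- out of range on both sides
      have : j ∉ (List.range' 1 (arr.length - 1)).filter
          (fun i => decide (arr.getD i 0 < 0)) := fun h => hj (hmem j h)
      rw [if_neg this, List.getElem?_eq_none (by omega),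
        List.getElem?_eq_none (by omega)]
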